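-- pv_equiv track=rewrite | github.com/eidanjacob/advent-of-code | 2020/11.py | south
-- ===== SOURCE A (Python) =====
-- def south(row, col, seating):
--     if row == len(seating)-1:
--         return 0
--     elif seating[row+1][col] == ".":
--         return south(row+1, col, seating)
--     elif seating[row+1][col] == "#":
--         return 1
--     else:
--         return 0
-- ===== SOURCE B (Python) =====
-- def south(row, col, seating):
--     for r in range(row + 1, len(seating)):
--         c = seating[r][col]
--         if c == ".":
--             continue
--         return 1 if c == "#" else 0
--     return 0
-- ===== Notes on version B (the rewrite author's own statement) =====
-- stated objective: simpler
-- what changed: Replaces the tail recursion with an explicit loop over the row indices row+1..len-1 (continue on '.', early return on the first non-floor cell).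
import Mathlib
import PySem

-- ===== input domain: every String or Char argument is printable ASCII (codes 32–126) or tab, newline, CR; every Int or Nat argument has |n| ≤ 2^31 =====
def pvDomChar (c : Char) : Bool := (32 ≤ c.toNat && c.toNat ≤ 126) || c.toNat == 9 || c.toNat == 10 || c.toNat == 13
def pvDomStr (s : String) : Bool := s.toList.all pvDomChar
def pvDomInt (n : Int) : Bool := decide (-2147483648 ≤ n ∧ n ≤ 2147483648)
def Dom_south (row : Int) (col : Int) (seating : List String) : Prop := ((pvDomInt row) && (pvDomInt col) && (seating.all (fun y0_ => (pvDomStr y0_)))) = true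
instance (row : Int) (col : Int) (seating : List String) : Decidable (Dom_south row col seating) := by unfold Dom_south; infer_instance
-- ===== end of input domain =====

-- B replaces A's tail recursion by an explicit loop over the row indices row+1..len-1 (simpler decomposition, same cost).


-- ===== PORT A =====
def south (row : Int) (col : Int) (seating : List String) : Int :=
  if row = (seating.length : Int) - 1 then 0
  else
    match hg : PySem.List.pyGet? seating (row + 1) with
    | none => 0   -- IndexError (excluded by Pre_)
    | some s =>
      match PySem.Str.pyGet? s col with
      | none => 0 -- IndexError (excluded by Pre_)
      | some c =>
        if c = '.' then south (row + 1) col seating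
        else if c = '#' then 1 else 0
termination_by ((seating.length : Int) - 1 - row).toNat
decreasing_by
  have hin : PySem.Raise.InRange seating.length (row + 1) := by
    by_contra hno
    rw [← PySem.List.pyGet?_eq_none_iff] at hno
    simp [hno] at hg
  unfold PySem.Raise.InRange at hin
  omega

-- ===== PORT B =====
-- B's loop: scan the index list range(row+1, len(seating)) left to right.
def southScan (col : Int) (seating : List String) (rs : List Int) : Int :=
  match rs with
  | [] => 0
  | r :: rest =>
    match PySem.List.pyGet? seating r with
    | none => 0   -- IndexError (excluded by Pre_)
    | some s =>
      match PySem.Str.pyGet? s col with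
      | none => 0 -- IndexError (excluded by Pre_)
      | some c =>
        if c = '.' then southScan col seating rest
        else if c = '#' then 1 else 0

def south_alt (row : Int) (col : Int) (seating : List String) : Int :=
  southScan col seating (PySem.List.pyRange (row + 1) (seating.length : Int) 1)

-- ===== PRECONDITION & SPEC =====
-- the character Python's seating[r][col] would read, none = IndexError (helper for Pre_ only)
def cellAt (seating : List String) (r : Int) (col : Int) : Option Char :=
  (PySem.List.pyGet? seating r).bind (fun s => PySem.Str.pyGet? s col)

-- Pre_ excludes exactly the inputs where the Python A raises IndexError: row past the last
-- row, or a scanned cell seating[r][col] out of range before any non-'.' cell stops the scan.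
def Pre_south (row : Int) (col : Int) (seating : List String) : Prop :=
  row = (seating.length : Int) - 1 ∨
  (row < (seating.length : Int) - 1 ∧ -(seating.length : Int) ≤ row + 1 ∧
    ∀ k : Nat, k < 2 * seating.length → row + 1 + (k : Int) < (seating.length : Int) →
      (∀ j : Nat, j < k → cellAt seating (row + 1 + (j : Int)) col = some '.') →
      (cellAt seating (row + 1 + (k : Int)) col).isSome = true)
instance (row : Int) (col : Int) (seating : List String) : Decidable (Pre_south row col seating) := by unfold Pre_south; infer_instance

def pvWitness_south : Int × Int × List String := (0, 0, ["..", "#L", ".."])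

def Spec_south (row : Int) (col : Int) (seating : List String) (out : Int) : Prop := out = south_alt row col seating
instance (row : Int) (col : Int) (seating : List String) (out : Int) : Decidable (Spec_south row col seating out) := by unfold Spec_south; infer_instance

-- ===== CLAIM (what is proved, stated in full; the proofs are below) =====
def Claim_equal_south : Prop := ∀ (row : Int) (col : Int) (seating : List String), Dom_south row col seating → Pre_south row col seating → Spec_south row col seating (south row col seating)

-- ===== LEMMAS AND PROOFS =====

-- Key lemma: wherever no scanned cell raises before the scan stops, A's recursion equals
-- B's scan of range(row+1, len).
theorem south_eq_scan (col : Int) (seating : List String) :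
    ∀ (n : Nat) (row : Int), ((seating.length : Int) - 1 - row).toNat = n →
      (∀ k : Nat, k < n →
        (∀ j : Nat, j < k → cellAt seating (row + 1 + (j : Int)) col = some '.') →
        (cellAt seating (row + 1 + (k : Int)) col).isSome = true) →
      south row col seating
        = southScan col seating (PySem.List.pyRange (row + 1) (seating.length : Int) 1) := by
  intro n
  induction n with
  | zero =>
    intro row hn _
    rw [south]
    rw [PySem.List.pyRange_one_eq_nil (by omega)]
    by_cases h : row = (seating.length : Int) - 1
    · simp [h, southScan]
    · have hnone : PySem.List.pyGet? seating (row + 1) = none := by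
        rw [PySem.List.pyGet?_eq_none_iff]
        unfold PySem.Raise.InRange
        omega
      simp only [h, if_false]
      split
      · rfl
      · next s heq => rw [hnone] at heq; cases heq
  | succ k ih =>
    intro row hn hpre
    have hlt : row < (seating.length : Int) - 1 := by omega
    have h0 := hpre 0 (Nat.succ_pos k) (by intro j hj; exact absurd hj (Nat.not_lt_zero j))
    rw [south]
    rw [PySem.List.pyRange_one_cons (by omega)]
    have hne : ¬ row = (seating.length : Int) - 1 := by omega
    simp only [hne, if_false]
    unfold southScan
    simp only [Nat.cast_zero, add_zero] at h0
    unfold cellAt at h0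
    simp only [PySem.Str.pyGet?_eq, PySem.Chars.pyGet?_eq_listPyGet?] at h0 ⊢
    cases hg : PySem.List.pyGet? seating (row + 1) with
    | none => simp [hg] at h0
    | some s =>
      rw [hg] at h0
      simp only [Option.bind_some] at h0
      obtain ⟨c, hc⟩ := Option.isSome_iff_exists.mp h0
      dsimp only
      rw [hc]
      by_cases hdot : c = '.'
      · subst hdot
        simpa using ih (row + 1) (by omega) (by
            intro k' hk' hpref
            have hstep := hpre (k' + 1) (by omega) (by
              intro j hj
              cases j with
              | zero =>
                simp only [Nat.cast_zero, add_zero]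
                unfold cellAt
                rw [hg]
                simp only [Option.bind_some, PySem.Str.pyGet?_eq,
                  PySem.Chars.pyGet?_eq_listPyGet?]
                exact hc
              | succ j' =>
                have := hpref j' (by omega)
                have harith : row + 1 + ((j' + 1 : Nat) : Int) = row + 1 + 1 + (j' : Int) := by
                  push_cast; ring
                rw [harith]
                exact this)
            have harith : row + 1 + ((k' + 1 : Nat) : Int) = row + 1 + 1 + (k' : Int) := by
              push_cast; ring
            rw [harith] at hstep
            exact hstep)
      · simp [hdot]

theorem south_spec_aux (row col : Int) (seating : List String)
    (hpre : Pre_south row col seating) :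
    south row col seating = south_alt row col seating := by
  unfold south_alt
  unfold Pre_south at hpre
  rcases hpre with h | ⟨h1, hb, h2⟩
  · rw [south]
    rw [PySem.List.pyRange_one_eq_nil (by omega)]
    simp [h, southScan]
  · exact south_eq_scan col seating _ row rfl
      (fun k hk hpref => h2 k (by omega) (by omega) hpref)

-- ===== VERDICT (by name: the statement is the Claim_ definition above) =====
theorem south_spec : Claim_equal_south := by
  intro row col seating _ hpre
  unfold Spec_south
  exact south_spec_aux row col seating hpre
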